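-- pv_equiv track=rewrite | github.com/luizatebesoi/restaurant_reviews | scripts/data_processing_functions_final.py | group_unique_ids
-- ===== SOURCE A (Python) =====
-- def group_unique_ids(initial, comparison):
--     results = []
--     for item in initial:
--         item_key = item[0]
--         item_unique_id = item[1]
--
--         for i in comparison:
--             i_key = i[0]
--             i_unique_id = i[1]
--             if item_key == i_key:
--                 item_unique_id += ", " + i_unique_id
--
--         results.append(item_unique_id)
--     return results
-- ===== SOURCE B (Python) =====
-- def group_unique_ids(initial, comparison):
--     suffix = {}
--     for k, u in comparison:
--         suffix[k] = suffix.get(k, "") + ", " + u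
--     return [u + suffix.get(k, "") for k, u in initial]
-- ===== Notes on version B (the rewrite author's own statement) =====
-- stated objective: alternative
-- what changed: Replaces A's per-item inner scan of comparison with a single pass that accumulates a dict of pre-concatenated suffixes per key, then one lookup per initial item.
import Mathlib
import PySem

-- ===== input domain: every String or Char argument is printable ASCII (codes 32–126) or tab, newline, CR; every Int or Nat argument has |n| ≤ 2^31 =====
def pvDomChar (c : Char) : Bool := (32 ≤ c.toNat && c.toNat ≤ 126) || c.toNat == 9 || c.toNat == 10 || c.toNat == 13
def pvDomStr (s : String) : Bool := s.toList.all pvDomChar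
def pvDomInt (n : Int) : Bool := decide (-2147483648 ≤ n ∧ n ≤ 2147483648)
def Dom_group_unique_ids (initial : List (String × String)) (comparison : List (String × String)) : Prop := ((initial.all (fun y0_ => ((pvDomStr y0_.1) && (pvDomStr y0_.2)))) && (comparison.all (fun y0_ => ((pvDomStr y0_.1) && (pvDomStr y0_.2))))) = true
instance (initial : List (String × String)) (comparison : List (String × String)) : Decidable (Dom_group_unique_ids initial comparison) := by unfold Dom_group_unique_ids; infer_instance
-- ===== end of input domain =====

-- B replaces A's per-item rescan of `comparison` with a dict of pre-concatenated suffixes per key, built in one pass (alternative algorithm; not measurably faster on the timed inputs).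

-- ===== PORT A =====
def group_unique_ids (initial : List (String × String)) (comparison : List (String × String)) : List String :=
  initial.foldl (fun results item =>
    results ++ [comparison.foldl (fun acc i =>
      if item.1 == i.1 then acc ++ ", " ++ i.2 else acc) item.2]) []

-- ===== PORT B =====
def group_unique_ids_alt (initial : List (String × String)) (comparison : List (String × String)) : List String :=
  let suffix : PySem.Dict String String :=
    comparison.foldl (fun d kv => d.insert kv.1 (d.getD kv.1 "" ++ ", " ++ kv.2)) PySem.Dict.empty
  initial.map (fun kv => kv.2 ++ suffix.getD kv.1 "")

-- ===== PRECONDITION & SPEC =====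
def Spec_group_unique_ids (initial : List (String × String)) (comparison : List (String × String)) (out : List String) : Prop := out = group_unique_ids_alt initial comparison
instance (initial : List (String × String)) (comparison : List (String × String)) (out : List String) : Decidable (Spec_group_unique_ids initial comparison out) := by unfold Spec_group_unique_ids; infer_instance

-- ===== CLAIM (what is proved, stated in full; the proofs are below) =====
def Claim_equal_group_unique_ids : Prop := ∀ (initial : List (String × String)) (comparison : List (String × String)), Dom_group_unique_ids initial comparison → Spec_group_unique_ids initial comparison (group_unique_ids initial comparison)

-- ===== LEMMAS AND PROOFS =====

-- The suffix dict looked up at key k equals the left fold that appends ", " ++ uid for each matching pair.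
theorem pv_suffix_getD (comparison : List (String × String)) (d : PySem.Dict String String) (k : String) :
    (comparison.foldl (fun d kv => d.insert kv.1 (d.getD kv.1 "" ++ ", " ++ kv.2)) d).getD k "" =
      comparison.foldl (fun s kv => if k == kv.1 then s ++ ", " ++ kv.2 else s) (d.getD k "") := by
  induction comparison generalizing d with
  | nil => rfl
  | cons kv rest ih =>
    simp only [List.foldl]
    rw [ih, PySem.Dict.getD_insert]
    by_cases h : k = kv.1
    · simp [h]
    · simp [h, beq_iff_eq]

-- Pull the starting accumulator of A's inner fold out front.
theorem pv_fold_start (comparison : List (String × String)) (k s : String) :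
    comparison.foldl (fun acc i => if k == i.1 then acc ++ ", " ++ i.2 else acc) s =
      s ++ comparison.foldl (fun acc i => if k == i.1 then acc ++ ", " ++ i.2 else acc) "" := by
  induction comparison generalizing s with
  | nil => simp
  | cons kv rest ih =>
    simp only [List.foldl]
    by_cases h : (k == kv.1) = true
    · rw [if_pos h, if_pos h, ih (s ++ ", " ++ kv.2), ih ("" ++ ", " ++ kv.2)]
      simp [String.append_assoc]
    · rw [if_neg h, if_neg h, ih]

-- A's outer fold appending singletons is a map.
theorem pv_fold_map {α β : Type} (xs : List α) (g : α → β) (init : List β) :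
    xs.foldl (fun r x => r ++ [g x]) init = init ++ xs.map g := by
  induction xs generalizing init with
  | nil => simp
  | cons x rest ih => simp [List.foldl, ih]

-- ===== VERDICT (by name: the statement is the Claim_ definition above) =====
theorem group_unique_ids_spec : Claim_equal_group_unique_ids := by
  intro initial comparison _
  unfold Spec_group_unique_ids group_unique_ids group_unique_ids_alt
  rw [pv_fold_map]
  simp only [List.nil_append]
  apply List.map_congr_left
  intro kv _
  rw [pv_fold_start, pv_suffix_getD]
  rfl
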